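-- pv_equiv track=rewrite | github.com/PISANKINA/ewercis | ex13.py | odd_list
-- ===== SOURCE A (Python) =====
-- def odd_list(a, n):
--     if n == 0:
--         return []
--     number = a[-n]
--     if number % 2 > 0:
--         return odd_list(a, n-1)
--     else:
--         return [number] + odd_list(a, n-1)
-- ===== SOURCE B (Python) =====
-- def odd_list(a, n):
--     if n == 0:
--         return []
--     result = []
--     for i in range(n, 0, -1):
--         x = a[-i]
--         if x % 2 == 0:
--             result.append(x)
--     return result
-- ===== Notes on version B (the rewrite author's own statement) =====
-- stated objective: idiomatic
-- what changed: Replaces the list-building recursion by a single explicit loop over range(n,0,-1) appending even elements to an accumulator list (avoids A's per-step tail copying and recursion depth).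
-- crash fix: For n < 0 A recurses with ever-growing positive index until it raises (IndexError, or RecursionError on an infinite list-like input), while B's empty range(n,0,-1) makes it return []. — e.g. on odd_list([1, 2], -1): A raises IndexError, B returns []
import Mathlib
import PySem

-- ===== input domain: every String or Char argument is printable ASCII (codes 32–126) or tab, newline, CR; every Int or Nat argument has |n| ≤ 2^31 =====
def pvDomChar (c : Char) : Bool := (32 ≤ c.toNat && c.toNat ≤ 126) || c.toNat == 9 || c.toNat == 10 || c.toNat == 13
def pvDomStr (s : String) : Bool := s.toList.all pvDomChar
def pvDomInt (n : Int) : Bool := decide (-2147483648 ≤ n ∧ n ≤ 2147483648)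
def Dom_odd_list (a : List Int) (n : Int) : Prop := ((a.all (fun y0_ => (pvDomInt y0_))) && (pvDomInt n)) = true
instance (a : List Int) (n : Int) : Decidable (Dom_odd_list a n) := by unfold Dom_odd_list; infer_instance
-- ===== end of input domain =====

-- B replaces A's tail-copying recursion with one explicit accumulator loop;  equivalence is about the return value.

-- ===== PORT A =====
-- A recurses on n; structural recursion on n.toNat, with the n < 0 guard only ensuring
-- totality of the port (A diverges there; excluded by Pre_).
def odd_list_go (a : List Int) : Nat → List Int
  | 0 => []
  | Nat.succ k =>
    match PySem.List.pyGet? a (-((k : Int) + 1)) with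
    | none => []  -- IndexError in Python; excluded by Pre_
    | some number =>
      if PySem.Int.mod number 2 > 0 then odd_list_go a k
      else number :: odd_list_go a k

def odd_list (a : List Int) (n : Int) : List Int :=
  if n < 0 then [] else odd_list_go a n.toNat

-- ===== PORT B =====
def odd_list_alt (a : List Int) (n : Int) : List Int :=
  if n == 0 then []
  else
    (PySem.List.pyRange n 0 (-1)).foldl
      (fun result i =>
        match PySem.List.pyGet? a (-i) with
        | none => result  -- IndexError in Python; excluded by Pre_
        | some x => if PySem.Int.mod x 2 == 0 then result ++ [x] else result)
      []

-- ===== PRECONDITION & SPEC =====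
-- A raises for n < 0 (unbounded recursion) and for n > len(a) (IndexError); Pre_ excludes exactly those.
def Pre_odd_list (a : List Int) (n : Int) : Prop := 0 ≤ n ∧ n ≤ a.length
instance (a : List Int) (n : Int) : Decidable (Pre_odd_list a n) := by unfold Pre_odd_list; infer_instance
def pvWitness_odd_list : List Int × Int := ([3, 4, 5, 6], 3)

-- For n < 0 A recurses with ever-growing positive index until it raises, while B's empty range makes it return [].
def Raises_odd_list (a : List Int) (n : Int) : Prop := n < 0
instance (a : List Int) (n : Int) : Decidable (Raises_odd_list a n) := by unfold Raises_odd_list; infer_instance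
def pvRaiseWitness_odd_list : List Int × Int := ([1, 2], -1)
def pvRaiseWitnessOut_odd_list : List Int := []

def Spec_odd_list (a : List Int) (n : Int) (out : List Int) : Prop := out = odd_list_alt a n
instance (a : List Int) (n : Int) (out : List Int) : Decidable (Spec_odd_list a n out) := by unfold Spec_odd_list; infer_instance

-- ===== CLAIM (what is proved, stated in full; the proofs are below) =====
def Claim_equal_odd_list : Prop := ∀ (a : List Int) (n : Int), Dom_odd_list a n → Pre_odd_list a n → Spec_odd_list a n (odd_list a n)
def Claim_raises_odd_list : Prop := (∀ (a : List Int) (n : Int), Dom_odd_list a n → Raises_odd_list a n → ¬ Pre_odd_list a n) ∧ (Dom_odd_list (pvRaiseWitness_odd_list.1) (pvRaiseWitness_odd_list.2) ∧ Raises_odd_list (pvRaiseWitness_odd_list.1) (pvRaiseWitness_odd_list.2) ∧ odd_list_alt (pvRaiseWitness_odd_list.1) (pvRaiseWitness_odd_list.2) = pvRaiseWitnessOut_odd_list)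

-- ===== LEMMAS AND PROOFS =====

-- B's loop body, as a function
def odd_step (a : List Int) (result : List Int) (i : Int) : List Int :=
  match PySem.List.pyGet? a (-i) with
  | none => result
  | some x => if PySem.Int.mod x 2 == 0 then result ++ [x] else result

lemma odd_step_acc (a : List Int) (result : List Int) (i : Int) :
    odd_step a result i = result ++ odd_step a [] i := by
  unfold odd_step
  cases PySem.List.pyGet? a (-i) with
  | none => simp
  | some x =>
    dsimp only
    by_cases h2 : (PySem.Int.mod x 2 == 0) = true
    · rw [if_pos h2, if_pos h2, List.nil_append]
    · rw [if_neg h2, if_neg h2, List.append_nil]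

lemma foldl_odd_step_acc (a : List Int) (l : List Int) (result : List Int) :
    l.foldl (odd_step a) result = result ++ l.foldl (odd_step a) [] := by
  induction l generalizing result with
  | nil => simp
  | cons i l ih =>
    simp only [List.foldl_cons]
    rw [ih (odd_step a result i), odd_step_acc, List.append_assoc, ← ih (odd_step a [] i)]

lemma odd_list_go_succ (a : List Int) (k : Nat) :
    odd_list_go a (k + 1) = (match PySem.List.pyGet? a (-((k : Int) + 1)) with
      | none => []
      | some number =>
        if PySem.Int.mod number 2 > 0 then odd_list_go a k else number :: odd_list_go a k) := rfl

lemma odd_go_eq_foldl (a : List Int) (k : Nat) (hk : (k : Int) ≤ a.length) :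
    odd_list_go a k = (PySem.List.pyRange (k : Int) 0 (-1)).foldl (odd_step a) [] := by
  induction k with
  | zero => simp [odd_list_go, PySem.List.pyRange_neg_one_eq_nil (by omega : (0:Int) ≤ 0)]
  | succ k ih =>
    rw [PySem.List.pyRange_neg_one_cons (by push_cast; omega : (0:Int) < (k+1 : Nat))]
    simp only [List.foldl_cons]
    rw [foldl_odd_step_acc]
    have hsome : ∃ x, PySem.List.pyGet? a (-((k : Int) + 1)) = some x := by
      rcases h : PySem.List.pyGet? a (-((k : Int) + 1)) with _ | x
      · rw [PySem.List.pyGet?_eq_none_iff] at h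
        exact absurd (by unfold PySem.Raise.InRange; push_cast at hk ⊢; omega) h
      · exact ⟨x, rfl⟩
    obtain ⟨x, hx⟩ := hsome
    have hcast : ((k : Int) + 1) = ((k + 1 : Nat) : Int) := by push_cast; ring
    have hx' : PySem.List.pyGet? a (-((k + 1 : Nat) : Int)) = some x := by rw [← hcast]; exact hx
    have hstep : odd_step a [] ((k + 1 : Nat) : Int) =
        if PySem.Int.mod x 2 == 0 then [x] else [] := by
      unfold odd_step; rw [hx']; simp
    rw [hstep]
    have hmod : 0 ≤ PySem.Int.mod x 2 := by
      have := PySem.Int.mod_eq_emod_of_pos (a := x) (b := 2) (by omega)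
      rw [this]; exact Int.emod_nonneg x (by omega)
    have hih := ih (by push_cast at hk ⊢; omega)
    have hsub : ((k + 1 : Nat) : Int) - 1 = (k : Int) := by push_cast; ring
    rw [hsub, ← hih, odd_list_go_succ, hx]
    dsimp only
    by_cases h0 : PySem.Int.mod x 2 = 0
    · simp only [h0, beq_self_eq_true, if_pos]
      rw [if_neg (by omega)]
      rfl
    · have hpos : PySem.Int.mod x 2 > 0 := by omega
      rw [if_pos hpos, if_neg (by simpa using h0), List.nil_append]

-- ===== VERDICT (by name: the statement is the Claim_ definition above) =====
theorem odd_list_spec : Claim_equal_odd_list := by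
  intro a n _ hpre
  obtain ⟨hn0, hnlen⟩ := hpre
  unfold Spec_odd_list odd_list odd_list_alt
  rw [if_neg (by omega)]
  by_cases hz : n = 0
  · subst hz; simp [odd_list_go]
  · rw [if_neg (by simpa using hz)]
    have hcast : ((n.toNat : Int)) = n := Int.toNat_of_nonneg hn0
    have := odd_go_eq_foldl a n.toNat (by rw [hcast]; exact hnlen)
    rw [this, hcast]
    rfl

@[simp] theorem odd_list_raises : Claim_raises_odd_list := by
  unfold Claim_raises_odd_list
  constructor
  · intro a n _ hr hpre
    unfold Raises_odd_list at hr
    exact absurd hpre.1 (by omega)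
  · refine ⟨by decide, by decide, ?_⟩
    decide
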